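-- pv_equiv track=rewrite | github.com/HeyJunie/GroupStudy | 05_30/10.py | solution
-- ===== SOURCE A (Python) =====
-- def solution(nums):
--     answer = 0
--     peak = []
--     low = []
--     n = len(nums)
--     for i in range(1, n-1):
--         if nums[i-1] < nums[i] and nums[i+1] < nums[i]:
--             peak.append(i)
--
--     for x in peak:
--         left = x
--         right = x
--         lcnt = 0
--         rcnt = 0
--         while left >= 1 and nums[left+1] < nums[left]:
--             lcnt += 1
--             left -= 1
--         while right < n-1 and nums[right] > nums[right+1]:
--             rcnt += 1
--             right += 1
--         answer += (rcnt * lcnt)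
--     return answer
-- ===== SOURCE B (Python) =====
-- def solution(nums):
--     n = len(nums)
--     desc = [0] * n
--     for i in range(n - 2, -1, -1):
--         if nums[i] > nums[i + 1]:
--             desc[i] = desc[i + 1] + 1
--     answer = 0
--     for i in range(1, n - 1):
--         if nums[i - 1] < nums[i] and nums[i + 1] < nums[i]:
--             answer += desc[i]
--     return answer
-- ===== Notes on version B (the rewrite author's own statement) =====
-- stated objective: simpler
-- what changed: A collects peak indices and re-scans left/right with while-loops per peak (the left scan always counts 1); B precomputes a suffix table of descending-run lengths in one backward pass and sums table entries at peaks in one forward pass.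
import Mathlib
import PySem

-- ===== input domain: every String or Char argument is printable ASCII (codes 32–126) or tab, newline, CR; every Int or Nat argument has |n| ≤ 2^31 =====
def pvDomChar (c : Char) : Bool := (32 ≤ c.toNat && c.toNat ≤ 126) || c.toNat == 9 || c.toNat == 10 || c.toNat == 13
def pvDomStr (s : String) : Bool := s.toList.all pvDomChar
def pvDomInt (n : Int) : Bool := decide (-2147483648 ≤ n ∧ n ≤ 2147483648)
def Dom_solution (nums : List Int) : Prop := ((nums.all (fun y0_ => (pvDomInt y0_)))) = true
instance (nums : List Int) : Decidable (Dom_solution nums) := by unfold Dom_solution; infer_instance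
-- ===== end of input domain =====

-- B replaces A's per-peak rescanning while-loops with one precomputed suffix table of
-- descending-run lengths and a single forward pass (objective: simpler).

-- ===== PORT A =====
-- while left >= 1 and nums[left+1] < nums[left]: lcnt += 1; left -= 1
def leftLoopA (nums : List Int) (left lcnt : Int) : Int :=
  if h : 1 ≤ left ∧ PySem.List.pyGetD nums (left + 1) 0 < PySem.List.pyGetD nums left 0 then
    leftLoopA nums (left - 1) (lcnt + 1)
  else lcnt
termination_by left.toNat
decreasing_by omega

-- while right < n-1 and nums[right] > nums[right+1]: rcnt += 1; right += 1
def rightLoopA (nums : List Int) (n right rcnt : Int) : Int :=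
  if h : right < n - 1 ∧ PySem.List.pyGetD nums (right + 1) 0 < PySem.List.pyGetD nums right 0 then
    rightLoopA nums n (right + 1) (rcnt + 1)
  else rcnt
termination_by (n - 1 - right).toNat
decreasing_by omega

def solution (nums : List Int) : Int :=
  let n : Int := nums.length
  let peak : List Int :=
    (PySem.List.pyRange 1 (n - 1)).foldl
      (fun acc i =>
        if PySem.List.pyGetD nums (i - 1) 0 < PySem.List.pyGetD nums i 0 ∧
           PySem.List.pyGetD nums (i + 1) 0 < PySem.List.pyGetD nums i 0
        then acc ++ [i] else acc) []
  peak.foldl (fun answer x => answer + rightLoopA nums n x 0 * leftLoopA nums x 0) 0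

-- ===== PORT B =====
-- backward pass: desc[i] = desc[i+1] + 1 if nums[i] > nums[i+1] else 0
def descTable : List Int → List Int
  | [] => []
  | x :: xs => (if xs.getD 0 x < x then (descTable xs).getD 0 0 + 1 else 0) :: descTable xs

def solution_alt (nums : List Int) : Int :=
  let n : Int := nums.length
  let desc := descTable nums
  (PySem.List.pyRange 1 (n - 1)).foldl
    (fun answer i =>
      if PySem.List.pyGetD nums (i - 1) 0 < PySem.List.pyGetD nums i 0 ∧
         PySem.List.pyGetD nums (i + 1) 0 < PySem.List.pyGetD nums i 0
      then answer + PySem.List.pyGetD desc i 0 else answer) 0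

-- ===== PRECONDITION & SPEC =====
def Spec_solution (nums : List Int) (out : Int) : Prop := out = solution_alt nums
instance (nums : List Int) (out : Int) : Decidable (Spec_solution nums out) := by unfold Spec_solution; infer_instance

-- ===== CLAIM (what is proved, stated in full; the proofs are below) =====
def Claim_equal_solution : Prop := ∀ (nums : List Int), Dom_solution nums → Spec_solution nums (solution nums)

-- ===== LEMMAS AND PROOFS =====

-- recurrence satisfied by the suffix table
lemma descTable_getD (nums : List Int) : ∀ (j : Nat),
    (descTable nums).getD j 0 =
      if j + 1 < nums.length ∧ nums.getD (j + 1) 0 < nums.getD j 0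
      then (descTable nums).getD (j + 1) 0 + 1 else 0 := by
  induction nums with
  | nil => intro j; simp [descTable]
  | cons x xs ih =>
    intro j
    cases j with
    | zero =>
      cases xs with
      | nil => simp [descTable]
      | cons y rest => simp [descTable]
    | succ k =>
      have := ih k
      simpa [descTable] using this

-- the right while-loop computes the suffix table entry (with its accumulator)
lemma rightLoopA_eq (nums : List Int) : ∀ (m j : Nat), nums.length - j ≤ m → ∀ (c : Int),
    rightLoopA nums (nums.length) (j : Int) c = c + (descTable nums).getD j 0 := by
  intro m
  induction m with
  | zero =>
    intro j hj c
    have hlen : nums.length ≤ j := by omega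
    rw [rightLoopA]
    rw [dif_neg]
    · rw [descTable_getD]
      rw [if_neg (by omega)]
      omega
    · rintro ⟨hlt, -⟩
      omega
  | succ m ih =>
    intro j hj c
    rw [rightLoopA, descTable_getD]
    by_cases h : (j : Int) < (nums.length : Int) - 1 ∧
        PySem.List.pyGetD nums ((j : Int) + 1) 0 < PySem.List.pyGetD nums (j : Int) 0
    · rw [dif_pos h]
      have hidx : ((j : Int) + 1) = ((j + 1 : Nat) : Int) := by push_cast; ring
      have hcond : j + 1 + 1 ≤ nums.length ∧ nums.getD (j + 1) 0 < nums.getD j 0 := by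
        constructor
        · have := h.1; omega
        · have := h.2
          rwa [hidx, PySem.List.pyGetD_natCast, PySem.List.pyGetD_natCast] at this
      rw [if_pos ⟨by omega, hcond.2⟩]
      rw [hidx, ih (j + 1) (by omega) (c + 1)]
      ring
    · rw [dif_neg h]
      rw [if_neg]
      · omega
      · intro hc
        apply h
        refine ⟨by omega, ?_⟩
        have hidx : ((j : Int) + 1) = ((j + 1 : Nat) : Int) := by push_cast; ring
        rw [hidx, PySem.List.pyGetD_natCast, PySem.List.pyGetD_natCast]
        exact hc.2

-- at a peak the left while-loop always counts exactly one step
lemma leftLoopA_eq_one (nums : List Int) (j : Nat) (h1 : 1 ≤ j)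
    (hl : nums.getD (j - 1) 0 < nums.getD j 0)
    (hr : PySem.List.pyGetD nums ((j : Int) + 1) 0 < PySem.List.pyGetD nums (j : Int) 0) :
    leftLoopA nums (j : Int) 0 = 1 := by
  rw [leftLoopA, dif_pos ⟨by exact_mod_cast h1, hr⟩]
  rw [leftLoopA, dif_neg]
  · norm_num
  rintro ⟨hone, hlt⟩
  have hj2 : 2 ≤ j := by omega
  have e1 : (j : Int) - 1 + 1 = ((j : Nat) : Int) := by ring
  have e2 : (j : Int) - 1 = ((j - 1 : Nat) : Int) := by omega
  rw [e1, e2, PySem.List.pyGetD_natCast, PySem.List.pyGetD_natCast] at hlt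
  omega

-- fuse A's two passes (peak list build + summation) into one conditional-sum fold
lemma fuse_foldl (L : List Int) (P : Int → Prop) [DecidablePred P] (f g : Int → Int)
    (h : ∀ x ∈ L, P x → f x = g x) : ∀ (acc : List Int) (a : Int),
    ((L.foldl (fun acc i => if P i then acc ++ [i] else acc) acc).foldl
        (fun s x => s + f x) a)
    = L.foldl (fun s i => if P i then s + g i else s) (acc.foldl (fun s x => s + f x) a) := by
  induction L with
  | nil => intro acc a; simp
  | cons x xs ih =>
    intro acc a
    simp only [List.foldl_cons]
    by_cases hp : P x
    · rw [if_pos hp, if_pos hp, ih (fun y hy => h y (by simp [hy]) )]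
      congr 1
      rw [List.foldl_append]
      simp [h x (by simp) hp]
    · rw [if_neg hp, if_neg hp, ih (fun y hy => h y (by simp [hy]))]

-- ===== VERDICT (by name: the statement is the Claim_ definition above) =====
theorem solution_spec : Claim_equal_solution := by
  intro nums _
  unfold Spec_solution solution solution_alt
  simp only []
  have hpt : ∀ i ∈ PySem.List.pyRange 1 ((nums.length : Int) - 1),
      (PySem.List.pyGetD nums (i - 1) 0 < PySem.List.pyGetD nums i 0 ∧
       PySem.List.pyGetD nums (i + 1) 0 < PySem.List.pyGetD nums i 0) →
      rightLoopA nums (nums.length) i 0 * leftLoopA nums i 0 =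
        PySem.List.pyGetD (descTable nums) i 0 := by
    intro i hi hPi
    obtain ⟨h1i, h2i⟩ := (PySem.List.mem_pyRange_one).1 hi
    obtain ⟨j, rfl⟩ : ∃ j : Nat, i = (j : Int) := ⟨i.toNat, by omega⟩
    have hj1 : 1 ≤ j := by exact_mod_cast h1i
    have hl : nums.getD (j - 1) 0 < nums.getD j 0 := by
      have := hPi.1
      have e2 : (j : Int) - 1 = ((j - 1 : Nat) : Int) := by omega
      rwa [e2, PySem.List.pyGetD_natCast, PySem.List.pyGetD_natCast] at this
    rw [leftLoopA_eq_one nums j hj1 hl hPi.2, mul_one]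
    rw [rightLoopA_eq nums (nums.length) j (by omega) 0, zero_add]
    rw [PySem.List.pyGetD_natCast]
  rw [fuse_foldl _ _ _ _ hpt]
  simp
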